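-- pv_equiv track=rewrite | github.com/MuhannadAlghamdi/netrange | netrange/__init__.py | group_ipaddrs
-- ===== SOURCE A (Python) =====
-- def group_ipaddrs(ipaddrs, octet):
--     group = [ipaddrs[0]]
--     for ip in ipaddrs[1:]:
--         if ip[:octet] == group[-1][:octet]:
--             group.append(ip)
--         else:
--             yield group
--             group = [ip]
--     yield group
-- ===== SOURCE B (Python) =====
-- def group_ipaddrs(ipaddrs, octet):
--     # Build the groups back-to-front: traverse in reverse, prepending each ip
--     # either onto the current front group (same prefix) or as a new front group.
--     groups = []
--     for ip in reversed(ipaddrs):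
--         if groups and ip[:octet] == groups[0][0][:octet]:
--             groups[0] = [ip] + groups[0]
--         else:
--             groups.insert(0, [ip])
--     yield from groups
-- ===== Notes on version B (the rewrite author's own statement) =====
-- stated objective: alternative
-- what changed: B traverses the list in reverse and builds the group list back-to-front by prepending onto the front group (a foldr), instead of A's forward pass with a mutable current-group accumulator compared against its last element and yielded on change.
import Mathlib
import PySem

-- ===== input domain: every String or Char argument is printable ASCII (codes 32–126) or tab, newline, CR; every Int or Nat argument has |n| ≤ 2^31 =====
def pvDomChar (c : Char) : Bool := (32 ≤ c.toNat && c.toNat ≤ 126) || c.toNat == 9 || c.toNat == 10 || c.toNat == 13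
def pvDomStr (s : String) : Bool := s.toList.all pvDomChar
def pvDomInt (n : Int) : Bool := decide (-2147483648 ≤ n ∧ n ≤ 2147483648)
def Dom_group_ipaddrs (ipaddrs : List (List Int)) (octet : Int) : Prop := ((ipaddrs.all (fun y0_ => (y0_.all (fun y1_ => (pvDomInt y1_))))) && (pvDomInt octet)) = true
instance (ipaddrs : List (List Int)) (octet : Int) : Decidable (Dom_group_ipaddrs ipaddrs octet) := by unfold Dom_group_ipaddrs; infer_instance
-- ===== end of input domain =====

-- B groups the same consecutive runs by a reverse traversal building the output back-to-front (a foldr),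
-- instead of A's forward loop with a current-group accumulator; equivalence of return values is proved on nonempty input.

-- ===== PORT A =====
-- ip[:octet]
def pvKey (octet : Int) (ip : List Int) : List Int := PySem.List.slice ip none (some octet)

-- loop body of A: state = (group, groups yielded so far)
def pvStepA (octet : Int) (st : List (List Int) × List (List (List Int))) (ip : List Int) :
    List (List Int) × List (List (List Int)) :=
  if pvKey octet ip == pvKey octet ((PySem.List.pyGet? st.1 (-1)).getD []) then
    (st.1 ++ [ip], st.2)
  else
    ([ip], st.2 ++ [st.1])

def group_ipaddrs (ipaddrs : List (List Int)) (octet : Int) : List (List (List Int)) :=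
  match PySem.List.pyGet? ipaddrs 0 with
  | none => []  -- Python raises IndexError here (excluded by Pre_)
  | some x0 =>
    let st := (PySem.List.slice ipaddrs (some 1) none).foldl (pvStepA octet) ([x0], [])
    st.2 ++ [st.1]

-- ===== PORT B =====
-- one step of B's reversed loop: prepend ip onto the front group or open a new front group
def pvStepB (octet : Int) (ip : List Int) (gs : List (List (List Int))) : List (List (List Int)) :=
  match gs with
  | g :: rest =>
    if pvKey octet ip == pvKey octet (g.headD []) then (ip :: g) :: rest
    else [ip] :: g :: rest
  | [] => [[ip]]

def group_ipaddrs_alt (ipaddrs : List (List Int)) (octet : Int) : List (List (List Int)) :=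
  ipaddrs.foldr (pvStepB octet) []

-- ===== PRECONDITION & SPEC =====
-- Pre_ excludes only the empty list, on which Python A raises IndexError (ipaddrs[0]).
def Pre_group_ipaddrs (ipaddrs : List (List Int)) (octet : Int) : Prop := ipaddrs ≠ []
instance (ipaddrs : List (List Int)) (octet : Int) : Decidable (Pre_group_ipaddrs ipaddrs octet) := by
  unfold Pre_group_ipaddrs; infer_instance
def pvWitness_group_ipaddrs : List (List Int) × Int := ([[10, 0, 0, 1], [10, 0, 0, 2], [10, 1, 0, 1]], 2)

def Spec_group_ipaddrs (ipaddrs : List (List Int)) (octet : Int) (out : List (List (List Int))) : Prop := out = group_ipaddrs_alt ipaddrs octet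
instance (ipaddrs : List (List Int)) (octet : Int) (out : List (List (List Int))) : Decidable (Spec_group_ipaddrs ipaddrs octet out) := by unfold Spec_group_ipaddrs; infer_instance

-- ===== CLAIM (what is proved, stated in full; the proofs are below) =====
def Claim_equal_group_ipaddrs : Prop := ∀ (ipaddrs : List (List Int)) (octet : Int), Dom_group_ipaddrs ipaddrs octet → Pre_group_ipaddrs ipaddrs octet → Spec_group_ipaddrs ipaddrs octet (group_ipaddrs ipaddrs octet)

-- ===== LEMMAS AND PROOFS =====

-- how a finished group g is merged into the groups of the remaining suffix
def pvCons (octet : Int) (g : List (List Int)) (gs : List (List (List Int))) : List (List (List Int)) :=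
  match gs with
  | [] => [g]
  | h :: t =>
    if pvKey octet (h.headD []) == pvKey octet ((PySem.List.pyGet? g (-1)).getD []) then (g ++ h) :: t
    else g :: h :: t

theorem pvKey_last_singleton (octet : Int) (x : List Int) :
    pvKey octet ((PySem.List.pyGet? [x] (-1)).getD []) = pvKey octet x := by
  simp [PySem.List.pyGet?_neg_one]

theorem pvKey_last_append (octet : Int) (g : List (List Int)) (x : List Int) :
    pvKey octet ((PySem.List.pyGet? (g ++ [x]) (-1)).getD []) = pvKey octet x := by
  simp [PySem.List.pyGet?_neg_one_append_singleton]

-- merging one element: the pure identity behind one A-step vs one B-step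
theorem pvCons_nil (octet : Int) (g : List (List Int)) : pvCons octet g [] = [g] := rfl

theorem pvCons_cons (octet : Int) (g h : List (List Int)) (t : List (List (List Int))) :
    pvCons octet g (h :: t) =
      if pvKey octet (h.headD []) == pvKey octet ((PySem.List.pyGet? g (-1)).getD []) then (g ++ h) :: t
      else g :: h :: t := rfl

theorem pvStepB_cons (octet : Int) (x : List Int) (h : List (List Int)) (t : List (List (List Int))) :
    pvStepB octet x (h :: t) =
      if pvKey octet x == pvKey octet (h.headD []) then (x :: h) :: t else [x] :: h :: t := rfl

theorem pvCons_step (octet : Int) (x : List Int) (g : List (List Int))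
    (bs : List (List (List Int))) :
    (if pvKey octet x == pvKey octet ((PySem.List.pyGet? g (-1)).getD []) then
        pvCons octet (g ++ [x]) bs
      else [g] ++ pvCons octet [x] bs) = pvCons octet g (pvStepB octet x bs) := by
  cases bs with
  | nil =>
    show _ = pvCons octet g [[x]]
    rw [pvCons_cons]
    simp only [List.headD_cons, pvCons_nil]
    by_cases h1 : pvKey octet x = pvKey octet ((PySem.List.pyGet? g (-1)).getD [])
    · rw [if_pos (beq_iff_eq.mpr h1), if_pos (beq_iff_eq.mpr h1)]
    · rw [if_neg (fun hc => h1 (beq_iff_eq.mp hc)), if_neg (fun hc => h1 (beq_iff_eq.mp hc))]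
      rfl
  | cons h t =>
    rw [pvStepB_cons, pvCons_cons, pvCons_cons]
    simp only [pvKey_last_append, pvKey_last_singleton, List.headD_cons]
    by_cases h1 : pvKey octet x = pvKey octet ((PySem.List.pyGet? g (-1)).getD []) <;>
      by_cases h2 : pvKey octet x = pvKey octet (h.headD [])
    · rw [if_pos (beq_iff_eq.mpr h1), if_pos (beq_iff_eq.mpr h2.symm),
        if_pos (beq_iff_eq.mpr h2), pvCons_cons, List.headD_cons,
        if_pos (beq_iff_eq.mpr h1)]
      simp
    · rw [if_pos (beq_iff_eq.mpr h1), if_neg (fun hc => h2 (beq_iff_eq.mp hc).symm),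
        if_neg (fun hc => h2 (beq_iff_eq.mp hc)), pvCons_cons, List.headD_cons,
        if_pos (beq_iff_eq.mpr h1)]
    · rw [if_pos (beq_iff_eq.mpr h2.symm), if_pos (beq_iff_eq.mpr h2), pvCons_cons,
        List.headD_cons, if_neg (fun hc => h1 (beq_iff_eq.mp hc))]
      rw [if_pos (beq_iff_eq.mpr h2.symm), if_neg (fun hc => h1 (beq_iff_eq.mp hc))]
      rfl
    · rw [if_neg (fun hc => h2 (beq_iff_eq.mp hc).symm), if_neg (fun hc => h2 (beq_iff_eq.mp hc)),
        pvCons_cons, List.headD_cons, if_neg (fun hc => h1 (beq_iff_eq.mp hc))]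
      rw [if_neg (fun hc => h2 (beq_iff_eq.mp hc).symm), if_neg (fun hc => h1 (beq_iff_eq.mp hc))]
      rfl

-- the invariant of A's forward fold, stated against B's foldr
theorem pvMain (octet : Int) :
    ∀ (xs : List (List Int)) (g : List (List Int)) (acc : List (List (List Int))),
      (let st := xs.foldl (pvStepA octet) (g, acc); st.2 ++ [st.1]) =
        acc ++ pvCons octet g (xs.foldr (pvStepB octet) []) := by
  intro xs
  induction xs with
  | nil => intro g acc; simp [pvCons_nil]
  | cons x rest ih =>
    intro g acc
    simp only [List.foldl_cons, List.foldr_cons]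
    rw [← pvCons_step octet x g (rest.foldr (pvStepB octet) [])]
    by_cases h : pvKey octet x == pvKey octet ((PySem.List.pyGet? g (-1)).getD [])
    · rw [if_pos h]
      have := ih (g ++ [x]) acc
      simpa [pvStepA, h] using this
    · rw [if_neg h]
      have := ih [x] (acc ++ [g])
      simpa [pvStepA, h] using this

theorem pvCons_singleton (octet : Int) (x : List Int) (bs : List (List (List Int))) :
    pvCons octet [x] bs = pvStepB octet x bs := by
  cases bs with
  | nil => rfl
  | cons h t =>
    rw [pvCons_cons, pvStepB_cons, pvKey_last_singleton]
    by_cases hk : pvKey octet x = pvKey octet (h.headD [])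
    · rw [if_pos (beq_iff_eq.mpr hk.symm), if_pos (beq_iff_eq.mpr hk)]
      rfl
    · rw [if_neg (fun hc => hk (beq_iff_eq.mp hc).symm), if_neg (fun hc => hk (beq_iff_eq.mp hc))]

-- ===== VERDICT (by name: the statement is the Claim_ definition above) =====
theorem group_ipaddrs_spec : Claim_equal_group_ipaddrs := by
  intro ipaddrs octet _ hpre
  unfold Spec_group_ipaddrs
  cases ipaddrs with
  | nil => exact absurd rfl hpre
  | cons x rest =>
    unfold group_ipaddrs group_ipaddrs_alt
    rw [PySem.List.pyGet?_zero_cons]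
    simp only [PySem.List.slice_from_one, List.tail_cons, List.foldr_cons]
    rw [pvMain octet rest [x] []]
    simp [pvCons_singleton]
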